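-- pv_equiv track=rewrite | github.com/jameswmccarty/DailyProgrammer | chal_391.py | abacaba
-- ===== SOURCE A (Python) =====
-- def abacaba(step=26):
-- 	i = 97
-- 	string = ''
-- 	step = max(0,min(26,step))
-- 	while i < (97+step):
-- 		string = string + chr(i) + string
-- 		yield string
-- 		i += 1
-- ===== SOURCE B (Python) =====
-- _SHIFT = {ord('a') + i: ord('b') + i for i in range(25)}
--
-- def abacaba(step=26):
--     step = max(0, min(26, step))
--     cur = ''
--     for _ in range(step):
--         inner = cur.translate(_SHIFT)
--         if inner == '':
--             cur = 'a'
--         else: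
--             cur = 'a' + 'a'.join(inner) + 'a'
--         yield cur
-- ===== Notes on version B (the rewrite author's own statement) =====
-- stated objective: alternative
-- what changed: Each level is derived from the previous one by shifting every letter up one place in the alphabet and interleaving the letter a around it, instead of A's self-concatenation string = string + chr(i) + string.
import Mathlib
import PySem

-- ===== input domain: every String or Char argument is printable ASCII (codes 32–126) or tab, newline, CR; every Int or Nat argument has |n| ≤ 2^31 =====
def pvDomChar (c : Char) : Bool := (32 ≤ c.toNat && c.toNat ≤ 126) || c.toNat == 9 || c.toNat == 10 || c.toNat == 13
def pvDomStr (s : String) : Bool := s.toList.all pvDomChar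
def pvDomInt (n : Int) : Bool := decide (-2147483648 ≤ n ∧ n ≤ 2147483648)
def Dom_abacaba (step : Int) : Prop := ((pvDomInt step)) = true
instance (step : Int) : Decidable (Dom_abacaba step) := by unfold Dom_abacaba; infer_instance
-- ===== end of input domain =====

-- B builds each level from the previous one by an alphabet shift plus 'a'-interleave instead of A's self-concatenation; objective: alternative.

-- ===== PORT A =====
-- while i < 97+step: string = string + chr(i) + string; yield string; i += 1
def aLoop : Nat → Nat → String → List String
  | 0, _, _ => []
  | Nat.succ n, i, s =>
      let s' := s ++ String.singleton (Char.ofNat (97 + i)) ++ s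
      s' :: aLoop n (i + 1) s'

def abacaba (step : Int) : List String :=
  aLoop (max 0 (min 26 step)).toNat 0 ""

-- ===== PORT B =====
-- _SHIFT = {ord('a')+i: ord('b')+i for i in range(25)}, i.e. 'a'..'y' ↦ 'b'..'z'
def shiftChar (c : Char) : Char :=
  if 97 ≤ c.toNat ∧ c.toNat ≤ 121 then Char.ofNat (c.toNat + 1) else c

def bLoop : Nat → String → List String
  | 0, _ => []
  | Nat.succ n, cur =>
      let inner := String.ofList (cur.toList.map shiftChar)   -- cur.translate(_SHIFT)
      -- 'a' if inner == '' else 'a' + 'a'.join(inner) + 'a'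
      let cur' := if inner = "" then "a"
                  else "a" ++ String.ofList (inner.toList.intersperse 'a') ++ "a"
      cur' :: bLoop n cur'

def abacaba_alt (step : Int) : List String :=
  bLoop (max 0 (min 26 step)).toNat ""

-- ===== PRECONDITION & SPEC =====
def Spec_abacaba (step : Int) (out : List String) : Prop := out = abacaba_alt step
instance (step : Int) (out : List String) : Decidable (Spec_abacaba step out) := by unfold Spec_abacaba; infer_instance

-- ===== CLAIM (what is proved, stated in full; the proofs are below) =====
def Claim_equal_abacaba : Prop := ∀ (step : Int), Dom_abacaba step → Spec_abacaba step (abacaba step)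

-- ===== LEMMAS AND PROOFS =====

-- the level-i list of characters, following A's recurrence
def L : Nat → List Char
  | 0 => []
  | i + 1 => L i ++ [Char.ofNat (97 + i)] ++ L i

-- 'a'-interleave: 'a' before, between and after the characters
def interA (l : List Char) : List Char := 'a' :: l.flatMap (fun c => [c, 'a'])

theorem interA_append_mid (x : List Char) (w : Char) :
    interA (x ++ [w] ++ x) = interA x ++ [w] ++ interA x := by
  simp [interA]

theorem interA_eq_intersperse (m : List Char) (hm : m ≠ []) :
    interA m = 'a' :: (m.intersperse 'a' ++ ['a']) := by
  induction m with
  | nil => simp at hm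
  | cons c rest ih =>
      cases rest with
      | nil => simp [interA]
      | cons d rest' =>
          have h2 : interA (d :: rest') = 'a' :: ((d :: rest').intersperse 'a' ++ ['a']) :=
            ih (by simp)
          simp only [interA, List.flatMap_cons] at h2 ⊢
          rw [List.intersperse_cons₂]
          simpa using h2

theorem shiftChar_level (i : Nat) (h : i ≤ 24) :
    shiftChar (Char.ofNat (97 + i)) = Char.ofNat (97 + (i + 1)) := by
  have hv : (Char.ofNat (97 + i)).toNat = 97 + i := by
    unfold Char.ofNat
    rw [dif_pos (by left; omega)]
    rfl
  simp only [shiftChar, hv]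
  rw [if_pos (by omega)]
  rw [Nat.add_assoc]

theorem interA_shift (i : Nat) (h : i ≤ 25) :
    interA ((L i).map shiftChar) = L (i + 1) := by
  induction i with
  | zero => simp [L, interA]
  | succ k ih =>
      have hk : k ≤ 24 := by omega
      show interA ((L (k + 1)).map shiftChar) = L (k + 2)
      have : (L (k + 1)).map shiftChar =
          (L k).map shiftChar ++ [Char.ofNat (97 + (k + 1))] ++ (L k).map shiftChar := by
        simp [L, shiftChar_level k hk]
      rw [this, interA_append_mid, ih (by omega)]
      simp [L]

theorem loop_eq (n : Nat) : ∀ (i : Nat) (s : String), i + n ≤ 26 → s.toList = L i →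
    bLoop n s = aLoop n i s := by
  induction n with
  | zero => intro i s _ _; simp [bLoop, aLoop]
  | succ k ih =>
      intro i s hn hs
      have hi : i ≤ 25 := by omega
      have hA : (s ++ String.singleton (Char.ofNat (97 + i)) ++ s).toList = L (i + 1) := by
        simp [hs, L]
      have hshift : (String.ofList (s.toList.map shiftChar)).toList = (L i).map shiftChar := by
        simp [hs]
      have hB : (if String.ofList (s.toList.map shiftChar) = "" then "a"
            else "a" ++ String.ofList ((String.ofList (s.toList.map shiftChar)).toList.intersperse 'a') ++ "a").toList
          = L (i + 1) := by
        by_cases he : String.ofList (s.toList.map shiftChar) = ""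
        · rw [if_pos he]
          have hnil : (L i).map shiftChar = [] := by
            have := congrArg String.toList he
            rw [hshift] at this
            simpa using this
          rw [← interA_shift i hi, hnil]
          simp [interA]
        · rw [if_neg he]
          have hne : (L i).map shiftChar ≠ [] := by
            intro hcontra
            apply he
            apply String.toList_inj.mp
            rw [hshift, hcontra]
            simp
          rw [← interA_shift i hi, interA_eq_intersperse _ hne]
          simp [hshift]
      have hstr : (if String.ofList (s.toList.map shiftChar) = "" then "a"
            else "a" ++ String.ofList ((String.ofList (s.toList.map shiftChar)).toList.intersperse 'a') ++ "a")
          = s ++ String.singleton (Char.ofNat (97 + i)) ++ s := by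
        apply String.toList_inj.mp
        rw [hB, hA]
      simp only [bLoop, aLoop]
      rw [hstr, ih (i + 1) _ (by omega) hA]

-- ===== VERDICT (by name: the statement is the Claim_ definition above) =====
theorem abacaba_spec : Claim_equal_abacaba := by
  intro step _
  unfold Spec_abacaba abacaba abacaba_alt
  rw [loop_eq _ 0 "" (by omega) (by simp [L])]
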